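-- pv_equiv track=rewrite | github.com/alip67/Non-Linear-Diffusion--Community-detection | Nonlinear Diffusion with Growth or Decay/nonlinear_diffusion.py | find_Min_rank
-- ===== SOURCE A (Python) =====
-- def find_Min_rank(rank_dicts, weight_dicts):
--     # G = nx.from_numpy_matrix(G)
--     # nodes = list(G.nodes)
--     result = {}
--     weight = {}
--
--     for i in range(0, len(rank_dicts)):
--         for k, v in rank_dicts[i].items():
--             if k in result:
--                 if result[k][0] > v:
--                     result[k] = (v, i)
--                     weight[k] = weight_dicts[i][k]
--                 if result[k][0] == v:
--                     if weight_dicts[i][k] < weight[k]: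
--                         result[k] = (v, i)
--                         weight[k] = weight_dicts[i][k]
--             else:
--                 result[k] = (v, i)
--                 weight[k] = weight_dicts[i][k]
--
--     return result
-- ===== SOURCE B (Python) =====
-- def find_Min_rank(rank_dicts, weight_dicts):
--     # collect-then-reduce: group all (rank, weight, index) candidates per key,
--     # then pick the first lexicographic minimum per key
--     groups = {}
--     for i, rd in enumerate(rank_dicts):
--         for k, v in rd.items():
--             t = (v, weight_dicts[i][k], i)
--             if k in groups:
--                 groups[k].append(t)
--             else:
--                 groups[k] = [t]
--     result = {}
--     for k, cands in groups.items():
--         best = min(cands, key=lambda t: (t[0], t[1]))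
--         result[k] = (best[0], best[2])
--     return result
-- ===== Notes on version B (the rewrite author's own statement) =====
-- stated objective: alternative
-- what changed: A keeps one running (best rank, index) plus its weight per key updated through a three-branch cascade; B first builds a grouping table mapping each key to its full list of (rank, weight, index) candidates and then, in a second reduce pass, picks the first lexicographic (rank, weight) minimum per key.
-- outside the precondition, e.g. on find_Min_rank([{1: 0}, {1: 5}], [{1: 7}, {}]): A returns {1: (0, 0)}, B raises KeyError
import Mathlib
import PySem

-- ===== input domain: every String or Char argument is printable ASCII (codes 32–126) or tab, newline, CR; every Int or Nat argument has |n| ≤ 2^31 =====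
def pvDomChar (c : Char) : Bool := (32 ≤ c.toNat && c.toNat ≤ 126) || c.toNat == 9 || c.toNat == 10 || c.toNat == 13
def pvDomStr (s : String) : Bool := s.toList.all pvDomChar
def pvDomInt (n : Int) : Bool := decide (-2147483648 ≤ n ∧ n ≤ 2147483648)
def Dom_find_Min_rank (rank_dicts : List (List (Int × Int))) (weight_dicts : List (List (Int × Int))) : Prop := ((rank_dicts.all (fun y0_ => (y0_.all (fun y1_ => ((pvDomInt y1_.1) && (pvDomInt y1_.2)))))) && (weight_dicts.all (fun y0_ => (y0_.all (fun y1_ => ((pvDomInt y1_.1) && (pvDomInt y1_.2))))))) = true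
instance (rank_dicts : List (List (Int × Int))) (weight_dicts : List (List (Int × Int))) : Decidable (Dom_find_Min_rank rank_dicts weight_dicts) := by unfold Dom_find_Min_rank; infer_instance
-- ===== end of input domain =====

-- B re-implements A as collect-then-reduce (group all (rank, weight, index) candidates per key,
-- then take the first lexicographic minimum); same return value, objective: alternative decomposition.

-- ===== PORT A =====
-- literal transliteration of A: one pass keeping, per key, the current best (rank, index) in
-- `result` and its weight in `weight`, updated in A's exact branch order.
def find_Min_rank (rank_dicts : List (List (Int × Int))) (weight_dicts : List (List (Int × Int))) : List (Int × Int × Int) :=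
  -- result = {}, weight = {}
  -- for i in range(0, len(rank_dicts)):  (i from range is always in range, so pyGetD is exact here)
  (((PySem.List.pyRange 0 (PySem.List.len rank_dicts)).foldl
    (fun (st : PySem.Dict Int (Int × Int) × PySem.Dict Int Int) i =>
      -- for k, v in rank_dicts[i].items():  (a dict is its association list, in insertion order)
      (PySem.List.pyGetD rank_dicts i []).foldl
        (fun st kv =>
          let k := kv.1
          let v := kv.2
          -- weight_dicts[i][k]: Pre_ guarantees the index and the key exist (KeyError/IndexError excluded)
          let w := (PySem.Dict.ofList (PySem.List.pyGetD weight_dicts i [])).getD k 0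
          if st.1.contains k then
            let st1 :=
              if (st.1.getD k (0, 0)).1 > v then
                (st.1.insert k (v, i), st.2.insert k w)
              else st
            if (st1.1.getD k (0, 0)).1 == v then
              if w < st1.2.getD k 0 then (st1.1.insert k (v, i), st1.2.insert k w)
              else st1
            else st1
          else (st.1.insert k (v, i), st.2.insert k w))
        st)
    (PySem.Dict.empty, PySem.Dict.empty)).1).items

-- ===== PORT B =====
-- min(cands, key=lambda t: (t[0], t[1])): fold that replaces only on a strictly smaller
-- (rank, weight) pair, so the FIRST minimum wins, exactly like Python's min
def pvMinCand (b : Int × Int × Int) (l : List (Int × Int × Int)) : Int × Int × Int :=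
  l.foldl (fun b c => if c.1 < b.1 ∨ (c.1 = b.1 ∧ c.2.1 < b.2.1) then c else b) b

def find_Min_rank_alt (rank_dicts : List (List (Int × Int))) (weight_dicts : List (List (Int × Int))) : List (Int × Int × Int) :=
  -- groups = {}; for i, rd in enumerate(rank_dicts): for k, v in rd.items(): append (v, weight_dicts[i][k], i)
  let groups : PySem.Dict Int (List (Int × Int × Int)) :=
    (PySem.List.enumerate rank_dicts).foldl
      (fun g p =>
        p.2.foldl
          (fun g kv =>
            let t := (kv.2, (PySem.Dict.ofList (PySem.List.pyGetD weight_dicts p.1 [])).getD kv.1 0, p.1)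
            if g.contains kv.1 then g.insert kv.1 (g.getD kv.1 [] ++ [t])
            else g.insert kv.1 [t])
          g)
      PySem.Dict.empty
  -- result = {}; for k, cands in groups.items(): best = min(cands, key=...); result[k] = (best[0], best[2])
  (groups.items.foldl
    (fun (r : PySem.Dict Int (Int × Int)) p =>
      match p.2 with
      | [] => r   -- unreachable: groups never stores an empty candidate list
      | c :: cs => r.insert p.1 ((pvMinCand c cs).1, (pvMinCand c cs).2.2))
    PySem.Dict.empty).items

-- ===== PRECONDITION & SPEC =====
-- Pre_ excludes inputs where A raises KeyError/IndexError (a key of rank_dicts[i] missing from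
-- weight_dicts[i]); it is slightly narrower than A's raising set (A skips the weight lookup when the
-- new rank is strictly worse) and it also excludes association lists with duplicate keys, which do
-- not represent a Python dict.
def Pre_find_Min_rank (rank_dicts : List (List (Int × Int))) (weight_dicts : List (List (Int × Int))) : Prop :=
  (∀ d ∈ rank_dicts, (d.map Prod.fst).Nodup) ∧
  (∀ d ∈ weight_dicts, (d.map Prod.fst).Nodup) ∧
  (∀ p ∈ rank_dicts.zipIdx, ∀ kv ∈ p.1, kv.1 ∈ (weight_dicts.getD p.2 []).map Prod.fst)
instance (rank_dicts : List (List (Int × Int))) (weight_dicts : List (List (Int × Int))) : Decidable (Pre_find_Min_rank rank_dicts weight_dicts) := by unfold Pre_find_Min_rank; infer_instance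

def pvWitness_find_Min_rank : (List (List (Int × Int))) × (List (List (Int × Int))) :=
  ([[(1, 2), (3, 2)], [(1, 1)]], [[(1, 5), (3, 4)], [(1, 7)]])

def Spec_find_Min_rank (rank_dicts : List (List (Int × Int))) (weight_dicts : List (List (Int × Int))) (out : List (Int × Int × Int)) : Prop := out = find_Min_rank_alt rank_dicts weight_dicts
instance (rank_dicts : List (List (Int × Int))) (weight_dicts : List (List (Int × Int))) (out : List (Int × Int × Int)) : Decidable (Spec_find_Min_rank rank_dicts weight_dicts out) := by unfold Spec_find_Min_rank; infer_instance

-- ===== CLAIM (what is proved, stated in full; the proofs are below) =====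
def Claim_equal_find_Min_rank : Prop := ∀ (rank_dicts : List (List (Int × Int))) (weight_dicts : List (List (Int × Int))), Dom_find_Min_rank rank_dicts weight_dicts → Pre_find_Min_rank rank_dicts weight_dicts → Spec_find_Min_rank rank_dicts weight_dicts (find_Min_rank rank_dicts weight_dicts)

-- ===== LEMMAS AND PROOFS =====

-- the weight looked up for key k in weight_dicts[i]
def pvW (weight_dicts : List (List (Int × Int))) (i k : Int) : Int :=
  (PySem.Dict.ofList (PySem.List.pyGetD weight_dicts i [])).getD k 0

-- first lexicographic minimum of a candidate list (junk on [])
def pvBestOf : List (Int × Int × Int) → Int × Int × Int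
  | [] => (0, 0, 0)
  | c :: cs => pvMinCand c cs

def pvProj (b : Int × Int × Int) : Int × Int := (b.1, b.2.2)

-- A's inner-loop body, as a function of one flattened candidate (k, v, w, i)
def pvStepA (st : PySem.Dict Int (Int × Int) × PySem.Dict Int Int) (c : Int × Int × Int × Int) :
    PySem.Dict Int (Int × Int) × PySem.Dict Int Int :=
  if st.1.contains c.1 then
    let st1 :=
      if (st.1.getD c.1 (0, 0)).1 > c.2.1 then
        (st.1.insert c.1 (c.2.1, c.2.2.2), st.2.insert c.1 c.2.2.1)
      else st
    if (st1.1.getD c.1 (0, 0)).1 == c.2.1 then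
      if c.2.2.1 < st1.2.getD c.1 0 then (st1.1.insert c.1 (c.2.1, c.2.2.2), st1.2.insert c.1 c.2.2.1)
      else st1
    else st1
  else (st.1.insert c.1 (c.2.1, c.2.2.2), st.2.insert c.1 c.2.2.1)

-- B's grouping body on one flattened candidate
def pvStepB (g : PySem.Dict Int (List (Int × Int × Int))) (c : Int × Int × Int × Int) :
    PySem.Dict Int (List (Int × Int × Int)) :=
  if g.contains c.1 then g.insert c.1 (g.getD c.1 [] ++ [(c.2.1, c.2.2.1, c.2.2.2)])
  else g.insert c.1 [(c.2.1, c.2.2.1, c.2.2.2)]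

def pvFlat (rank_dicts weight_dicts : List (List (Int × Int))) : List (Int × Int × Int × Int) :=
  (PySem.List.pyRange 0 (PySem.List.len rank_dicts)).flatMap
    (fun i => (PySem.List.pyGetD rank_dicts i []).map (fun kv => (kv.1, kv.2, pvW weight_dicts i kv.1, i)))

-- the invariant tying A's running state to B's grouping table
def pvInv (st : PySem.Dict Int (Int × Int) × PySem.Dict Int Int)
    (g : PySem.Dict Int (List (Int × Int × Int))) : Prop :=
  st.1.items = g.items.map (fun p => (p.1, pvProj (pvBestOf p.2))) ∧
  (∀ k, st.2.get? k = (g.get? k).map (fun l => (pvBestOf l).2.1)) ∧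
  (∀ p ∈ g.items, p.2 ≠ []) ∧
  g.keys.Nodup

lemma pv_foldl_flatMap {α β γ : Type} (l : List α) (f : α → List β) (g : γ → β → γ) (init : γ) :
    (l.flatMap f).foldl g init = l.foldl (fun acc a => (f a).foldl g acc) init := by
  induction l generalizing init with
  | nil => rfl
  | cons x xs ih => simp [List.flatMap_cons, List.foldl_append, ih]

lemma pv_get?_mk {β γ : Type} (F : β → γ) (l : List (Int × β)) (k : Int) :
    (PySem.Dict.mk (l.map (fun p => (p.1, F p.2))) : PySem.Dict Int γ).get? k
      = ((PySem.Dict.mk l : PySem.Dict Int β).get? k).map F := by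
  induction l with
  | nil => rfl
  | cons p rest ih =>
      obtain ⟨a, v⟩ := p
      simp only [List.map_cons, PySem.Dict.get?_mk_cons]
      by_cases h : a = k
      · simp [h]
      · simp [h, ih]

lemma pv_get?_of_items_map {β γ : Type} (F : β → γ) (d : PySem.Dict Int γ)
    (e : PySem.Dict Int β) (h : d.items = e.items.map (fun p => (p.1, F p.2))) (k : Int) :
    d.get? k = (e.get? k).map F := by
  have hd : d = PySem.Dict.mk (e.items.map (fun p => (p.1, F p.2))) := PySem.Dict.ext h
  have he : e = PySem.Dict.mk e.items := rfl
  rw [hd, pv_get?_mk, ← he]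

lemma pv_contains_of_items_map {β γ : Type} (F : β → γ) (d : PySem.Dict Int γ)
    (e : PySem.Dict Int β) (h : d.items = e.items.map (fun p => (p.1, F p.2))) (k : Int) :
    d.contains k = e.contains k := by
  rw [PySem.Dict.contains_eq_isSome_get?, PySem.Dict.contains_eq_isSome_get?,
    pv_get?_of_items_map F d e h k]
  cases e.get? k <;> rfl

lemma pvMinCand_append (b : Int × Int × Int) (l : List (Int × Int × Int)) (t : Int × Int × Int) :
    pvMinCand b (l ++ [t])
      = (if t.1 < (pvMinCand b l).1 ∨ (t.1 = (pvMinCand b l).1 ∧ t.2.1 < (pvMinCand b l).2.1)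
         then t else pvMinCand b l) := by
  simp [pvMinCand, List.foldl_append]

lemma pvBestOf_append (l : List (Int × Int × Int)) (hl : l ≠ []) (t : Int × Int × Int) :
    pvBestOf (l ++ [t])
      = (if t.1 < (pvBestOf l).1 ∨ (t.1 = (pvBestOf l).1 ∧ t.2.1 < (pvBestOf l).2.1)
         then t else pvBestOf l) := by
  cases l with
  | nil => exact absurd rfl hl
  | cons c cs => simp [pvBestOf, pvMinCand_append]

-- the heart: one candidate step preserves the invariant
lemma pvInv_step (st : PySem.Dict Int (Int × Int) × PySem.Dict Int Int)
    (g : PySem.Dict Int (List (Int × Int × Int))) (c : Int × Int × Int × Int)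
    (h : pvInv st g) : pvInv (pvStepA st c) (pvStepB g c) := by
  obtain ⟨hres, hwt, hne, hnd⟩ := h
  obtain ⟨k, v, w, i⟩ := c
  have hget : ∀ k', st.1.get? k' = (g.get? k').map (fun l => pvProj (pvBestOf l)) :=
    fun k' => pv_get?_of_items_map _ _ _ hres k'
  have hcont : st.1.contains k = g.contains k := pv_contains_of_items_map (fun l => pvProj (pvBestOf l)) _ _ hres k
  by_cases hc : g.contains k = true
  · -- key already grouped
    obtain ⟨lk, hg⟩ : ∃ lk, g.get? k = some lk := by
      have := (PySem.Dict.contains_eq_isSome_get? g k).symm.trans hc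
      exact Option.isSome_iff_exists.mp this
    have hlkne : lk ≠ [] := hne _ (PySem.Dict.mem_items_of_get?_eq_some g hg)
    set b := pvBestOf lk with hb
    have hres_get : st.1.get? k = some (pvProj b) := by rw [hget, hg]; rfl
    have hres_getD : st.1.getD k (0, 0) = (b.1, b.2.2) := by
      rw [PySem.Dict.getD_eq_get?_getD, hres_get]; rfl
    have hwt_get : st.2.get? k = some b.2.1 := by rw [hwt, hg]; rfl
    have hwt_getD : st.2.getD k 0 = b.2.1 := by
      rw [PySem.Dict.getD_eq_get?_getD, hwt_get]; rfl
    have hgD : g.getD k [] = lk := by rw [PySem.Dict.getD_eq_get?_getD, hg]; rfl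
    have hcontA : st.1.contains k = true := hcont.trans hc
    have hbest : pvBestOf (lk ++ [(v, w, i)])
        = (if v < b.1 ∨ (v = b.1 ∧ w < b.2.1) then (v, w, i) else b) := by
      rw [pvBestOf_append lk hlkne]
    have hstepB : pvStepB g (k, v, w, i) = g.insert k (lk ++ [(v, w, i)]) := by
      simp [pvStepB, hc, hgD]
    have hitemsB : (pvStepB g (k, v, w, i)).items
        = g.items.map (fun p => if p.1 == k then (k, lk ++ [(v, w, i)]) else p) := by
      rw [hstepB, PySem.Dict.items_insert_of_contains g _ hc]
    -- value stored at key k in g.items is lk (keys are nodup)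
    have hval : ∀ p ∈ g.items, p.1 = k → p.2 = lk := by
      intro p hp hpk
      have : g.get? k = some p.2 := by
        refine (PySem.Dict.get?_eq_some_iff_mem_items g k p.2 hnd).mpr ?_
        rwa [← hpk, Prod.mk.eta]
      rw [hg] at this; exact (Option.some.injEq _ _ ▸ this).symm
    -- common goal pieces, parameterized by the two cases below
    have main : ∀ res' : PySem.Dict Int (Int × Int) × PySem.Dict Int Int,
        pvStepA st (k, v, w, i) = res' →
        res'.1.items = st.1.items.map (fun p => if p.1 == k then (k, pvProj (pvBestOf (lk ++ [(v, w, i)]))) else p) →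
        (∀ k', res'.2.get? k' = if k' = k then some ((pvBestOf (lk ++ [(v, w, i)])).2.1) else st.2.get? k') →
        pvInv (pvStepA st (k, v, w, i)) (pvStepB g (k, v, w, i)) := by
      intro res' hstep hri hrw
      rw [hstep]
      refine ⟨?_, ?_, ?_, ?_⟩
      · rw [hri, hres, hitemsB, List.map_map, List.map_map]
        refine List.map_congr_left ?_
        intro p hp
        by_cases hpk : p.1 = k
        · have hp2 : p.2 = lk := hval p hp hpk
          simp [Function.comp, pvProj, hpk]
        · simp [Function.comp, hpk]
      · intro k'
        rw [hrw, hstepB]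
        by_cases hk' : k' = k
        · subst hk'; rw [PySem.Dict.get?_insert]; simp
        · rw [PySem.Dict.get?_insert]; simp [hk', hwt]
      · intro p hp
        rw [hstepB] at hp
        rcases (PySem.Dict.mem_items_insert _ _ _ _).mp hp with hp1 | hp2
        · rw [hp1]; simp
        · exact hne _ hp2.1
      · rw [hstepB, PySem.Dict.keys_insert_of_contains g _ hc]; exact hnd
    by_cases h1 : b.1 > v
    · -- strictly better rank: A replaces, then the == branch compares w with itself
      have hcond : v < b.1 ∨ (v = b.1 ∧ w < b.2.1) := Or.inl h1
      refine main (st.1.insert k (v, i), st.2.insert k w) ?_ ?_ ?_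
      · simp only [pvStepA, hcontA, hres_getD, if_pos h1]
        simp
      · rw [hbest, if_pos hcond]
        rw [PySem.Dict.items_insert_of_contains st.1 _ hcontA]
        rfl
      · intro k'
        rw [hbest, if_pos hcond, PySem.Dict.get?_insert]
    · by_cases h2 : b.1 = v
      · by_cases h3 : w < b.2.1
        · -- equal rank, strictly smaller weight: A replaces
          have hcond : v < b.1 ∨ (v = b.1 ∧ w < b.2.1) := Or.inr ⟨h2.symm, h3⟩
          refine main (st.1.insert k (v, i), st.2.insert k w) ?_ ?_ ?_
          · simp only [pvStepA, hcontA]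
            simp [hres_getD, h2, hwt_getD, h3]
          · rw [hbest, if_pos hcond]
            rw [PySem.Dict.items_insert_of_contains st.1 _ hcontA]
            rfl
          · intro k'
            rw [hbest, if_pos hcond, PySem.Dict.get?_insert]
        · -- equal rank, weight not smaller: A keeps its state
          have hcond : ¬(v < b.1 ∨ (v = b.1 ∧ w < b.2.1)) := by
            rintro (h' | ⟨h', h''⟩) <;> omega
          refine main st ?_ ?_ ?_
          · simp only [pvStepA, hcontA]
            simp [hres_getD, h2, hwt_getD, h3]
          · rw [hbest, if_neg hcond]
            refine ((List.map_congr_left ?_).trans (List.map_id _)).symm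
            intro p hp
            by_cases hpk : p.1 = k
            · have : p.2 = (b.1, b.2.2) := by
                have hmem : (p.1, p.2) ∈ st.1.items := by rwa [Prod.mk.eta]
                have : st.1.get? p.1 = some p.2 := by
                  refine (PySem.Dict.get?_eq_some_iff_mem_items st.1 p.1 p.2 ?_).mpr hmem
                  · -- st.1.keys = g.keys (items map fst), so Nodup transfers
                    have hk : st.1.keys = g.keys := by
                      show st.1.items.map Prod.fst = g.items.map Prod.fst
                      rw [hres, List.map_map]; rfl
                    rw [hk]; exact hnd
                rw [hpk, hres_get] at this
                exact (Option.some.injEq _ _ ▸ this).symm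
              simp [hpk, this, pvProj, Prod.ext_iff]
            · simp [hpk]
          · intro k'
            rw [hbest, if_neg hcond]
            by_cases hk' : k' = k
            · subst hk'; simp [hwt_get]
            · simp [hk']
      · -- strictly worse rank: A does nothing
        have h1' : b.1 < v := by omega
        have hcond : ¬(v < b.1 ∨ (v = b.1 ∧ w < b.2.1)) := by
          rintro (h' | ⟨h', h''⟩) <;> omega
        refine main st ?_ ?_ ?_
        · have hne2 : (b.1 == v) = false := by simp; omega
          simp only [pvStepA, hcontA, hres_getD, if_neg h1, hne2]
          simp
        · rw [hbest, if_neg hcond]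
          refine ((List.map_congr_left ?_).trans (List.map_id _)).symm
          intro p hp
          by_cases hpk : p.1 = k
          · have : p.2 = (b.1, b.2.2) := by
              have hmem : (p.1, p.2) ∈ st.1.items := by rwa [Prod.mk.eta]
              have : st.1.get? p.1 = some p.2 := by
                refine (PySem.Dict.get?_eq_some_iff_mem_items st.1 p.1 p.2 ?_).mpr hmem
                · have hk : st.1.keys = g.keys := by
                    show st.1.items.map Prod.fst = g.items.map Prod.fst
                    rw [hres, List.map_map]; rfl
                  rw [hk]; exact hnd
              rw [hpk, hres_get] at this
              exact (Option.some.injEq _ _ ▸ this).symm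
            simp [hpk, this, pvProj, Prod.ext_iff]
          · simp [hpk]
        · intro k'
          rw [hbest, if_neg hcond]
          by_cases hk' : k' = k
          · subst hk'; simp [hwt_get]
          · simp [hk']
  · -- fresh key: both sides append
    have hc' : g.contains k = false := by simpa using hc
    have hcA : st.1.contains k = false := hcont.trans hc'
    have hstepA : pvStepA st (k, v, w, i) = (st.1.insert k (v, i), st.2.insert k w) := by
      simp [pvStepA, hcA]
    have hstepB : pvStepB g (k, v, w, i) = g.insert k [(v, w, i)] := by
      simp [pvStepB, hc']
    rw [hstepA, hstepB]
    refine ⟨?_, ?_, ?_, ?_⟩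
    · rw [PySem.Dict.items_insert_of_not_contains st.1 _ hcA,
        PySem.Dict.items_insert_of_not_contains g _ hc', List.map_append, hres]
      rfl
    · intro k'
      rw [PySem.Dict.get?_insert, PySem.Dict.get?_insert]
      by_cases hk' : k' = k
      · simp [hk', pvBestOf, pvMinCand]
      · simp [hk', hwt]
    · intro p hp
      rw [PySem.Dict.items_insert_of_not_contains g _ hc'] at hp
      rcases List.mem_append.mp hp with hp1 | hp2
      · exact hne _ hp1
      · simp at hp2; rw [hp2]; simp
    · rw [PySem.Dict.keys_insert_of_not_contains g _ hc']
      have hkn : k ∉ g.keys := fun hk =>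
        absurd ((PySem.Dict.contains_iff_mem_keys g k).mpr hk) (by simp [hc'])
      simp only [List.nodup_append, List.nodup_singleton, true_and]
      refine ⟨hnd, ?_⟩
      exact fun a ha b hb => by
        rw [List.mem_singleton] at hb
        subst hb
        exact fun h => hkn (h ▸ ha)

lemma pvInv_foldl (C : List (Int × Int × Int × Int)) :
    pvInv (C.foldl pvStepA (PySem.Dict.empty, PySem.Dict.empty)) (C.foldl pvStepB PySem.Dict.empty) := by
  induction C using List.reverseRecOn with
  | nil =>
      refine ⟨rfl, ?_, ?_, ?_⟩
      · intro k; rfl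
      · intro p hp; cases hp
      · exact List.nodup_nil
  | append_singleton C c ih =>
      rw [List.foldl_append, List.foldl_append]
      exact pvInv_step _ _ c ih

-- A's nested loops compute the pvStepA fold over the flattened candidates
lemma pv_A_eq_flat (rank_dicts weight_dicts : List (List (Int × Int))) :
    find_Min_rank rank_dicts weight_dicts
      = (((pvFlat rank_dicts weight_dicts).foldl pvStepA (PySem.Dict.empty, PySem.Dict.empty)).1).items := by
  unfold find_Min_rank pvFlat
  rw [pv_foldl_flatMap]
  congr 1
  refine congrArg _ (PySem.List.foldl_congr_mem _ _ _ _ ?_)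
  intro acc x _
  rw [List.foldl_map]
  rfl

-- B's grouping pass computes the pvStepB fold over the same flattened candidates
lemma pv_B_groups_eq_flat (rank_dicts weight_dicts : List (List (Int × Int))) :
    ((PySem.List.enumerate rank_dicts).foldl
      (fun (g : PySem.Dict Int (List (Int × Int × Int))) p =>
        p.2.foldl
          (fun g kv =>
            let t := (kv.2, (PySem.Dict.ofList (PySem.List.pyGetD weight_dicts p.1 [])).getD kv.1 0, p.1)
            if g.contains kv.1 then g.insert kv.1 (g.getD kv.1 [] ++ [t])
            else g.insert kv.1 [t])
          g)
      PySem.Dict.empty)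
    = (pvFlat rank_dicts weight_dicts).foldl pvStepB PySem.Dict.empty := by
  unfold pvFlat
  rw [pv_foldl_flatMap, PySem.List.enumerate_eq_map_pyRange rank_dicts [], List.foldl_map]
  refine PySem.List.foldl_congr_mem _ _ _ _ ?_
  intro acc x _
  rw [List.foldl_map]
  rfl

theorem find_Min_rank_spec : Claim_equal_find_Min_rank := by
  intro rank_dicts weight_dicts _ _
  unfold Spec_find_Min_rank
  have hB : find_Min_rank_alt rank_dicts weight_dicts
      = (((PySem.List.enumerate rank_dicts).foldl
          (fun (g : PySem.Dict Int (List (Int × Int × Int))) p =>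
            p.2.foldl
              (fun g kv =>
                let t := (kv.2, (PySem.Dict.ofList (PySem.List.pyGetD weight_dicts p.1 [])).getD kv.1 0, p.1)
                if g.contains kv.1 then g.insert kv.1 (g.getD kv.1 [] ++ [t])
                else g.insert kv.1 [t])
              g)
          PySem.Dict.empty).items.foldl
          (fun (r : PySem.Dict Int (Int × Int)) p =>
            match p.2 with
            | [] => r
            | c :: cs => r.insert p.1 ((pvMinCand c cs).1, (pvMinCand c cs).2.2))
          PySem.Dict.empty).items := rfl
  rw [hB, pv_B_groups_eq_flat, pv_A_eq_flat]
  obtain ⟨hres, hwt, hne, hnd⟩ := pvInv_foldl (pvFlat rank_dicts weight_dicts)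
  set g := (pvFlat rank_dicts weight_dicts).foldl pvStepB PySem.Dict.empty with hgdef
  rw [hres]
  -- the reduce pass inserts each (fresh, distinct) key once, so its items are exactly the mapped items
  have hstep : g.items.foldl
      (fun (r : PySem.Dict Int (Int × Int)) p =>
        match p.2 with
        | [] => r
        | c :: cs => r.insert p.1 ((pvMinCand c cs).1, (pvMinCand c cs).2.2))
      PySem.Dict.empty
      = g.items.foldl (fun (r : PySem.Dict Int (Int × Int)) p => r.insert p.1 (pvProj (pvBestOf p.2)))
        PySem.Dict.empty := by
    refine PySem.List.foldl_congr_mem _ _ _ _ ?_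
    intro acc p hp
    cases hlp : p.2 with
    | nil => exact absurd hlp (hne p hp)
    | cons c cs => simp [pvBestOf, pvProj]
  rw [hstep]
  rw [PySem.Dict.items_foldl_insert_fresh g.items (fun p => p.1) (fun p => pvProj (pvBestOf p.2))
    PySem.Dict.empty (fun a _ => rfl) hnd]
  rfl
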